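-- pv_equiv track=rewrite | github.com/smvfe/ITMO | CT2/DM/4sem/GenFunctions/B.py | sqrt_1_plus_p
-- ===== SOURCE A (Python) =====
-- mod = 998244353
--
-- inv_2 = (mod + 1) // 2
--
-- def sqrt_1_plus_p(p, m):
--     res = [0] * m
--     res[0] = 1
--     for k in range(1, m):
--         p_k = p[k] if k < len(p) else 0
--         sum_inner = 0
--         for i in range(1, k):
--             if i <= len(res) and (k - i) < len(res):
--                 sum_inner = (sum_inner + res[i] * res[k - i]) % mod
--         sum_inner = (p_k - sum_inner) % mod
--         res[k] = sum_inner * inv_2 % mod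
--     return res
-- ===== SOURCE B (Python) =====
-- mod = 998244353
--
-- inv_2 = (mod + 1) // 2
--
-- def sqrt_1_plus_p(p, m):
--     # scatter/online-convolution: instead of gathering the full convolution sum
--     # for each k, push each newly known coefficient's contributions forward.
--     res = [0] * m
--     res[0] = 1
--     acc = [0] * (2 * m)
--     for k in range(1, m):
--         p_k = p[k] if k < len(p) else 0
--         v = (p_k - acc[k]) % mod * inv_2 % mod
--         res[k] = v
--         for i in range(1, k):
--             acc[k + i] = (acc[k + i] + 2 * v * res[i]) % mod
--         acc[2 * k] = (acc[2 * k] + v * v) % mod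
--     return res
-- ===== Notes on version B (the rewrite author's own statement) =====
-- stated objective: alternative
-- what changed: A gathers the full convolution sum for each coefficient with an inner scan over previous results; B instead scatters each newly computed coefficient's contributions forward into an accumulator array, so the sum for index k is already ready when k is reached.
import Mathlib
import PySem

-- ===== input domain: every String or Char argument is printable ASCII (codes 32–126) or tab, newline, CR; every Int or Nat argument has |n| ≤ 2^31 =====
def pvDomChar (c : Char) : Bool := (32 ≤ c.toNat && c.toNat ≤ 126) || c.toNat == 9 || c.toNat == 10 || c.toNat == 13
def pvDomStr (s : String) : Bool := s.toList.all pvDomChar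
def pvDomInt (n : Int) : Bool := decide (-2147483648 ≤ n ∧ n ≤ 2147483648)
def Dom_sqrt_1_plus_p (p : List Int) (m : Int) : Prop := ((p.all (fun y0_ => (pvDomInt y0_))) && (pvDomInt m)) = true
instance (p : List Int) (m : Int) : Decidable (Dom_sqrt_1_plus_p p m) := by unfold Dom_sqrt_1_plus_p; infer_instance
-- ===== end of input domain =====

-- B replaces A's per-coefficient gather of the convolution sum by an online scatter:
-- each newly found coefficient immediately pushes its contributions into an accumulator
-- array read later; same O(m^2) cost, a genuinely different traversal (objective: alternative).

def pvMod : Int := 998244353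

def pvInv2 : Int := PySem.Int.floordiv (pvMod + 1) 2

-- ===== PORT A =====
def pvASum (res : List Int) (k : Int) : Int :=
  (PySem.List.pyRange 1 k).foldl
    (fun s i =>
      if i ≤ (res.length : Int) ∧ k - i < (res.length : Int) then
        PySem.Int.mod (s + PySem.List.pyGetD res i 0 * PySem.List.pyGetD res (k - i) 0) pvMod
      else s) 0

def pvAStep (p : List Int) (res : List Int) (k : Int) : List Int :=
  let pk := if k < (p.length : Int) then PySem.List.pyGetD p k 0 else 0
  let s := PySem.Int.mod (pk - pvASum res k) pvMod
  res.set k.toNat (PySem.Int.mod (s * pvInv2) pvMod)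

def sqrt_1_plus_p (p : List Int) (m : Int) : List Int :=
  if m < 1 then []  -- totality guard: Python raises IndexError (res[0] = 1 on []); excluded by Pre_
  else (PySem.List.pyRange 1 m).foldl (pvAStep p) ((List.replicate m.toNat 0).set 0 1)

-- ===== PORT B =====
def pvBStep (p : List Int) (st : List Int × List Int) (k : Int) : List Int × List Int :=
  let pk := if k < (p.length : Int) then PySem.List.pyGetD p k 0 else 0
  let v := PySem.Int.mod (PySem.Int.mod (pk - PySem.List.pyGetD st.2 k 0) pvMod * pvInv2) pvMod
  let res := st.1.set k.toNat v
  let acc := (PySem.List.pyRange 1 k).foldl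
    (fun a i => a.set (k + i).toNat
      (PySem.Int.mod (PySem.List.pyGetD a (k + i) 0 + 2 * v * PySem.List.pyGetD res i 0) pvMod)) st.2
  let acc := acc.set (2 * k).toNat
      (PySem.Int.mod (PySem.List.pyGetD acc (2 * k) 0 + v * v) pvMod)
  (res, acc)

def sqrt_1_plus_p_alt (p : List Int) (m : Int) : List Int :=
  if m < 1 then []  -- totality guard: Python raises IndexError here too; excluded by Pre_
  else ((PySem.List.pyRange 1 m).foldl (pvBStep p)
      ((List.replicate m.toNat 0).set 0 1, List.replicate (2 * m).toNat 0)).1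

-- ===== PRECONDITION & SPEC =====
-- Pre_ excludes exactly m ≤ 0, where the Python A raises IndexError on `res[0] = 1`.
def Pre_sqrt_1_plus_p (p : List Int) (m : Int) : Prop := 1 ≤ m
instance (p : List Int) (m : Int) : Decidable (Pre_sqrt_1_plus_p p m) := by unfold Pre_sqrt_1_plus_p; infer_instance

def pvWitness_sqrt_1_plus_p : List Int × Int := ([5, 7, 11], 3)

def Spec_sqrt_1_plus_p (p : List Int) (m : Int) (out : List Int) : Prop := out = sqrt_1_plus_p_alt p m
instance (p : List Int) (m : Int) (out : List Int) : Decidable (Spec_sqrt_1_plus_p p m out) := by unfold Spec_sqrt_1_plus_p; infer_instance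

-- ===== CLAIM (what is proved, stated in full; the proofs are below) =====
def Claim_equal_sqrt_1_plus_p : Prop := ∀ (p : List Int) (m : Int), Dom_sqrt_1_plus_p p m → Pre_sqrt_1_plus_p p m → Spec_sqrt_1_plus_p p m (sqrt_1_plus_p p m)

-- ===== LEMMAS AND PROOFS =====

-- partial convolution sum: pairs (i, j-i) with both coefficients already computed (index < t)
def pvT (t j : Nat) (r : List Int) : Int :=
  ∑ i ∈ Finset.Icc 1 (j - 1), if i < t ∧ j - i < t then r.getD i 0 * r.getD (j - i) 0 else 0

lemma pvMod_pos : (0:Int) < pvMod := by norm_num [pvMod]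
lemma pvGetD_set_ne (a : List Int) (n m : Nat) (v : Int) (h : n ≠ m) :
    (a.set n v).getD m 0 = a.getD m 0 := by
  simp [List.getD, List.getElem?_set_ne h]
lemma pvGetD_set_self (a : List Int) (n : Nat) (v : Int) (h : n < a.length) :
    (a.set n v).getD n 0 = v := by
  simp [List.getD, h]
lemma pvFoldMod (g : Int → Int) : ∀ (l : List Int) (s : Int), 0 ≤ s → s < pvMod →
    l.foldl (fun s i => PySem.Int.mod (s + g i) pvMod) s = PySem.Int.mod (s + (l.map g).sum) pvMod := by
  intro l
  induction l with
  | nil => intro s h1 h2; simp [PySem.Int.mod_eq_emod_of_pos pvMod_pos, Int.emod_eq_of_lt h1 h2]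
  | cons x l ih =>
    intro s h1 h2
    simp only [List.foldl_cons, List.map_cons, List.sum_cons]
    rw [ih _ (PySem.Int.mod_nonneg _ pvMod_pos) (PySem.Int.mod_lt _ pvMod_pos)]
    simp only [PySem.Int.mod_eq_emod_of_pos pvMod_pos]
    rw [Int.emod_add_emod]
    ring_nf
lemma pvSumRange (g : Int → Int) : ∀ (t : Nat),
    ((PySem.List.pyRange 1 (t:Int)).map g).sum = ∑ i ∈ Finset.Icc 1 (t-1), g (i:Int) := by
  intro t
  induction t with
  | zero => simp [PySem.List.pyRange]
  | succ t ih =>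
    rcases Nat.eq_zero_or_pos t with h | h
    · subst h; simp [PySem.List.pyRange]
    · rw [show ((t+1:Nat):Int) = (t:Int)+1 by push_cast; ring,
        PySem.List.pyRange_one_succ_right (by exact_mod_cast h)]
      rw [List.map_append, List.sum_append, ih]
      have ht : t - 1 + 1 = t := Nat.succ_pred_eq_of_pos h
      rw [show (t+1)-1 = (t-1)+1 by omega, Finset.sum_Icc_succ_top (by omega), ht]
      simp
lemma pvNodupRange : ∀ (t : Nat), (PySem.List.pyRange 1 (t:Int)).Nodup := by
  intro t
  induction t with
  | zero => simp [PySem.List.pyRange]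
  | succ t ih =>
    rcases Nat.eq_zero_or_pos t with h | h
    · subst h; simp [PySem.List.pyRange]
    · rw [show ((t+1:Nat):Int) = (t:Int)+1 by push_cast; ring,
        PySem.List.pyRange_one_succ_right (by exact_mod_cast h)]
      refine List.Nodup.append ih (List.nodup_singleton _) ?_
      intro x hx hx2
      simp only [List.mem_singleton] at hx2
      rw [PySem.List.mem_pyRange_one] at hx
      omega
lemma pvT_stable (t j n : Nat) (a : List Int) (v : Int) (h : t ≤ n) :
    pvT t j (a.set n v) = pvT t j a := by
  unfold pvT
  refine Finset.sum_congr rfl ?_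
  intro i hi
  by_cases hc : i < t ∧ j - i < t
  · rw [if_pos hc, if_pos hc, pvGetD_set_ne _ _ _ _ (by omega), pvGetD_set_ne _ _ _ _ (by omega)]
  · rw [if_neg hc, if_neg hc]
lemma pvT_succ (t j : Nat) (a : List Int) (ht : 1 ≤ t) :
    pvT (t+1) j a = pvT t j a +
      (if t+1 ≤ j ∧ j ≤ 2*t-1 then 2 * a.getD t 0 * a.getD (j-t) 0
       else if j = 2*t then a.getD t 0 * a.getD t 0 else 0) := by
  unfold pvT
  have key : ∀ i ∈ Finset.Icc 1 (j-1),
      (if i < t+1 ∧ j - i < t+1 then a.getD i 0 * a.getD (j - i) 0 else 0) =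
      (if i < t ∧ j - i < t then a.getD i 0 * a.getD (j - i) 0 else 0) +
      (if (i < t+1 ∧ j - i < t+1) ∧ ¬(i < t ∧ j - i < t) then a.getD i 0 * a.getD (j - i) 0 else 0) := by
    intro i hi
    by_cases h1 : i < t ∧ j - i < t
    · rw [if_pos (by omega), if_pos h1, if_neg (by tauto), add_zero]
    · rw [if_neg h1, zero_add]
      by_cases h2 : i < t+1 ∧ j - i < t+1
      · rw [if_pos h2, if_pos ⟨h2, h1⟩]
      · rw [if_neg h2, if_neg (by tauto)]
  rw [Finset.sum_congr rfl key, Finset.sum_add_distrib]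
  congr 1
  rw [Finset.sum_ite, Finset.sum_const_zero, add_zero]
  by_cases hb1 : t+1 ≤ j ∧ j ≤ 2*t-1
  · rw [if_pos hb1]
    have hset : (Finset.Icc 1 (j-1)).filter (fun i => (i < t+1 ∧ j - i < t+1) ∧ ¬(i < t ∧ j - i < t)) = {t, j-t} := by
      ext i
      simp only [Finset.mem_filter, Finset.mem_Icc, Finset.mem_insert, Finset.mem_singleton]
      omega
    rw [hset, Finset.sum_pair (by omega)]
    have : j - (j - t) = t := by omega
    rw [this]; ring
  · rw [if_neg hb1]
    by_cases hb2 : j = 2*t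
    · rw [if_pos hb2]
      have hset : (Finset.Icc 1 (j-1)).filter (fun i => (i < t+1 ∧ j - i < t+1) ∧ ¬(i < t ∧ j - i < t)) = {t} := by
        ext i
        simp only [Finset.mem_filter, Finset.mem_Icc, Finset.mem_singleton]
        omega
      rw [hset, Finset.sum_singleton]
      have : j - t = t := by omega
      rw [this]
    · rw [if_neg hb2]
      have hset : (Finset.Icc 1 (j-1)).filter (fun i => (i < t+1 ∧ j - i < t+1) ∧ ¬(i < t ∧ j - i < t)) = ∅ := by
        ext i
        simp only [Finset.mem_filter, Finset.mem_Icc, Finset.notMem_empty, iff_false]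
        omega
      rw [hset, Finset.sum_empty]
lemma pvT_diag (t : Nat) (a : List Int) :
    pvT t t a = ∑ i ∈ Finset.Icc 1 (t-1), a.getD i 0 * a.getD (t-i) 0 := by
  unfold pvT
  refine Finset.sum_congr rfl ?_
  intro i hi
  simp only [Finset.mem_Icc] at hi
  rw [if_pos (by omega)]
lemma pvScatter (t : Nat) (v : Int) (r : List Int) :
    ∀ (l : List Int) (ac : List Int),
    l.Nodup → (∀ i ∈ l, 1 ≤ i ∧ (t:Int) + i < (ac.length : Int)) →
    ((l.foldl (fun a i => a.set ((t:Int) + i).toNat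
        (PySem.Int.mod (PySem.List.pyGetD a ((t:Int) + i) 0 + 2 * v * PySem.List.pyGetD r i 0) pvMod)) ac).length = ac.length ∧
     ∀ j : Nat, (l.foldl (fun a i => a.set ((t:Int) + i).toNat
        (PySem.Int.mod (PySem.List.pyGetD a ((t:Int) + i) 0 + 2 * v * PySem.List.pyGetD r i 0) pvMod)) ac).getD j 0 =
       if ((j:Int) - t) ∈ l then
         PySem.Int.mod (ac.getD j 0 + 2 * v * r.getD (j - t) 0) pvMod
       else ac.getD j 0) := by
  intro l
  induction l with
  | nil => intro ac _ _; simp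
  | cons x l ih =>
    intro ac hnd hb
    have hx := hb x List.mem_cons_self
    have hxnn : (0:Int) ≤ (t:Int) + x := by omega
    set ac' := ac.set ((t:Int) + x).toNat
        (PySem.Int.mod (PySem.List.pyGetD ac ((t:Int) + x) 0 + 2 * v * PySem.List.pyGetD r x 0) pvMod) with hac'
    have hlen' : ac'.length = ac.length := by simp [hac']
    have ih' := ih ac' (hnd.of_cons) (by
      intro i hi
      have := hb i (List.mem_cons_of_mem _ hi)
      omega)
    simp only [List.foldl_cons]
    rw [← hac']
    refine ⟨by rw [ih'.1, hlen'], ?_⟩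
    intro j
    rw [ih'.2 j]
    have hxl : x ∉ l := by simpa using (List.nodup_cons.mp hnd).1
    by_cases hjx : (j:Int) - t = x
    · have hjeq : ((t:Int) + x).toNat = j := by omega
      have hjnotl : ((j:Int) - t) ∉ l := by rw [hjx]; exact hxl
      rw [if_neg hjnotl, if_pos (by simp [hjx])]
      have hjlt : j < ac.length := by omega
      have hv : ac'.getD j 0 = PySem.Int.mod (PySem.List.pyGetD ac ((t:Int) + x) 0 + 2 * v * PySem.List.pyGetD r x 0) pvMod := by
        rw [hac', ← hjeq]; exact pvGetD_set_self _ _ _ (by omega)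
      rw [hv, PySem.List.pyGetD_of_nonneg ac _ hxnn,
        PySem.List.pyGetD_of_nonneg r _ (by omega)]
      have h2 : x.toNat = j - t := by omega
      rw [hjeq, h2]
    · have hne : ((t:Int) + x).toNat ≠ j := by omega
      have hu : ac'.getD j 0 = ac.getD j 0 := pvGetD_set_ne _ _ _ _ hne
      rw [hu]
      by_cases hjl : ((j:Int) - t) ∈ l
      · rw [if_pos hjl, if_pos (List.mem_cons_of_mem _ hjl)]
      · rw [if_neg hjl, if_neg (by simp [hjx, hjl])]

-- ===== step lemma =====
lemma pvStepEq (p a ac : List Int) (M t : Nat) (ht : 1 ≤ t) (htM : t < M)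
    (h2 : a.length = M) (h3 : ac.length = 2*M)
    (h4 : ∀ j < 2*M, ac.getD j 0 = PySem.Int.mod (pvT t j a) pvMod) :
    (pvBStep p (a, ac) (t:Int)).1 = pvAStep p a (t:Int) ∧
    (pvAStep p a (t:Int)).length = M ∧
    (pvBStep p (a, ac) (t:Int)).2.length = 2*M ∧
    ∀ j < 2*M, (pvBStep p (a, ac) (t:Int)).2.getD j 0 =
      PySem.Int.mod (pvT (t+1) j (pvAStep p a (t:Int))) pvMod := by
  -- the gather sum of A equals acc[t]
  have hsum : pvASum a (t:Int) = PySem.Int.mod (pvT t t a) pvMod := by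
    unfold pvASum
    rw [PySem.List.foldl_congr_mem _ _
      (fun s i => PySem.Int.mod (s + PySem.List.pyGetD a i 0 * PySem.List.pyGetD a ((t:Int) - i) 0) pvMod) 0
      (by
        intro acc x hxmem
        rw [PySem.List.mem_pyRange_one] at hxmem
        rw [if_pos (by constructor <;> [omega; omega])])]
    rw [pvFoldMod _ _ 0 le_rfl pvMod_pos, zero_add, pvSumRange, pvT_diag]
    congr 1
    refine Finset.sum_congr rfl ?_
    intro i hi
    simp only [Finset.mem_Icc] at hi
    rw [PySem.List.pyGetD_natCast, show ((t:Int) - (i:Int)) = ((t - i : Nat) : Int) by omega,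
      PySem.List.pyGetD_natCast]
  have hBv : PySem.List.pyGetD ((a, ac) : List Int × List Int).2 (t:Int) 0 = PySem.Int.mod (pvT t t a) pvMod := by
    show PySem.List.pyGetD ac (t:Int) 0 = _
    rw [PySem.List.pyGetD_natCast]
    exact h4 t (by omega)
  have h2t : (2*(t:Int)) = ((2*t : Nat) : Int) := by push_cast; ring
  have hbounds : ∀ i ∈ PySem.List.pyRange 1 (t:Int), 1 ≤ i ∧ (t:Int) + i < (ac.length : Int) := by
    intro i hi
    rw [PySem.List.mem_pyRange_one] at hi
    omega
  refine ⟨?_, ?_, ?_, ?_⟩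
  · simp only [pvBStep, pvAStep]
    rw [hBv, hsum]
  · simp only [pvAStep]
    simp [h2]
  · simp only [pvBStep]
    rw [hBv, h2t]
    simp only [Int.toNat_natCast]
    rw [List.length_set,
      (pvScatter t _ _ (PySem.List.pyRange 1 (t:Int)) ac (pvNodupRange t) hbounds).1, h3]
  · intro j hj
    simp only [pvBStep, pvAStep]
    rw [hBv, hsum, h2t]
    simp only [Int.toNat_natCast]
    obtain ⟨hsl, hsg⟩ := pvScatter t
      (PySem.Int.mod (PySem.Int.mod ((if (t:Int) < (p.length:Int) then PySem.List.pyGetD p (t:Int) 0 else 0)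
          - PySem.Int.mod (pvT t t a) pvMod) pvMod * pvInv2) pvMod)
      (a.set t (PySem.Int.mod (PySem.Int.mod ((if (t:Int) < (p.length:Int) then PySem.List.pyGetD p (t:Int) 0 else 0)
          - PySem.Int.mod (pvT t t a) pvMod) pvMod * pvInv2) pvMod))
      (PySem.List.pyRange 1 (t:Int)) ac (pvNodupRange t) hbounds
    set VAL := PySem.Int.mod (PySem.Int.mod ((if (t:Int) < (p.length:Int) then PySem.List.pyGetD p (t:Int) 0 else 0)
          - PySem.Int.mod (pvT t t a) pvMod) pvMod * pvInv2) pvMod with hVAL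
    set AC1 := (PySem.List.pyRange 1 (t:Int)).foldl (fun x i => x.set ((t:Int) + i).toNat
        (PySem.Int.mod (PySem.List.pyGetD x ((t:Int) + i) 0 + 2 * VAL * PySem.List.pyGetD (a.set t VAL) i 0) pvMod)) ac with hAC1
    have hAC1len : AC1.length = 2*M := by rw [hAC1, hsl, h3]
    have hAC12t : AC1.getD (2*t) 0 = ac.getD (2*t) 0 := by
      rw [hAC1, hsg (2*t), if_neg]
      rw [PySem.List.mem_pyRange_one]
      omega
    rw [PySem.List.pyGetD_natCast, hAC12t]
    rw [pvT_succ _ _ _ ht, pvT_stable t j t a VAL le_rfl]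
    by_cases hj2t : j = 2*t
    · subst hj2t
      rw [pvGetD_set_self _ _ _ (by omega)]
      rw [if_neg (by omega), if_pos rfl]
      rw [pvGetD_set_self _ _ _ (by omega), h4 _ (by omega)]
      simp only [PySem.Int.mod_eq_emod_of_pos pvMod_pos]
      rw [Int.emod_add_emod]
    · rw [pvGetD_set_ne _ _ _ _ (fun h => hj2t h.symm), hsg j]
      by_cases hmem : ((j:Int) - (t:Int)) ∈ PySem.List.pyRange 1 (t:Int)
      · rw [PySem.List.mem_pyRange_one] at hmem
        rw [if_pos (by rw [PySem.List.mem_pyRange_one]; omega)]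
        rw [if_pos (by omega)]
        rw [pvGetD_set_self _ _ _ (by omega), pvGetD_set_ne _ _ _ _ (by omega), h4 _ (by omega)]
        simp only [PySem.Int.mod_eq_emod_of_pos pvMod_pos]
        rw [Int.emod_add_emod]
      · rw [if_neg hmem, if_neg (by
          rw [PySem.List.mem_pyRange_one] at hmem
          omega), if_neg hj2t, add_zero]
        exact h4 j hj

lemma pvT_one (j : Nat) (a : List Int) : pvT 1 j a = 0 := by
  unfold pvT
  apply Finset.sum_eq_zero
  intro i hi
  simp only [Finset.mem_Icc] at hi
  rw [if_neg (by omega)]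

def pvAFold (p : List Int) (m : Int) (t : Nat) : List Int :=
  (PySem.List.pyRange 1 (t:Int)).foldl (pvAStep p) ((List.replicate m.toNat 0).set 0 1)

def pvBFold (p : List Int) (m : Int) (t : Nat) : List Int × List Int :=
  (PySem.List.pyRange 1 (t:Int)).foldl (pvBStep p)
    ((List.replicate m.toNat 0).set 0 1, List.replicate (2*m).toNat 0)

lemma pvMain (p : List Int) (m : Int) (hm : 1 ≤ m) :
    ∀ (t : Nat), 1 ≤ t → t ≤ m.toNat →
    (pvBFold p m t).1 = pvAFold p m t ∧
    (pvAFold p m t).length = m.toNat ∧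
    (pvBFold p m t).2.length = 2*m.toNat ∧
    ∀ j : Nat, j < 2*m.toNat →
      (pvBFold p m t).2.getD j 0 = PySem.Int.mod (pvT t j (pvAFold p m t)) pvMod := by
  intro t ht
  induction t, ht using Nat.le_induction with
  | base =>
    intro _
    have hr : PySem.List.pyRange 1 ((1:Nat):Int) = [] := by simp [PySem.List.pyRange]
    refine ⟨?_, ?_, ?_, ?_⟩
    · simp [pvAFold, pvBFold]
    · simp [pvAFold]
    · simp [pvBFold]
      omega
    · intro j hj
      simp only [pvAFold, pvBFold, hr, List.foldl_nil]
      rw [pvT_one]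
      simp [PySem.Int.mod_eq_emod_of_pos pvMod_pos, List.getD]
  | succ t ht ih =>
    intro hle
    obtain ⟨h1, h2, h3, h4⟩ := ih (by omega)
    have hcast : ((t+1:Nat):Int) = (t:Int)+1 := by push_cast; ring
    have hA : pvAFold p m (t+1) = pvAStep p (pvAFold p m t) (t:Int) := by
      unfold pvAFold
      rw [hcast, PySem.List.pyRange_one_succ_right (by exact_mod_cast ht), List.foldl_append,
        List.foldl_cons, List.foldl_nil]
    have hB : pvBFold p m (t+1) = pvBStep p (pvBFold p m t) (t:Int) := by
      unfold pvBFold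
      rw [hcast, PySem.List.pyRange_one_succ_right (by exact_mod_cast ht), List.foldl_append,
        List.foldl_cons, List.foldl_nil]
    have hpair : pvBFold p m t = (pvAFold p m t, (pvBFold p m t).2) := by
      rw [← h1]
    rw [hA, hB, hpair]
    exact pvStepEq p (pvAFold p m t) ((pvBFold p m t).2) m.toNat t ht (by omega) h2 h3 h4

-- ===== VERDICT (by name: the statement is the Claim_ definition above) =====
theorem sqrt_1_plus_p_spec : Claim_equal_sqrt_1_plus_p := by
  intro p m _ hm
  have hm1 : 1 ≤ m := hm
  unfold Spec_sqrt_1_plus_p sqrt_1_plus_p sqrt_1_plus_p_alt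
  rw [if_neg (by omega), if_neg (by omega)]
  have h := (pvMain p m hm1 m.toNat (by omega) le_rfl).1
  simp only [pvAFold, pvBFold] at h
  rw [Int.toNat_of_nonneg (by omega)] at h
  exact h.symm
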